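-- pv_equiv track=rewrite | github.com/michael-howell-island/codesurface | src/codesurface/parsers/go.py | _count_braces
-- ===== SOURCE A (Python) =====
-- def _count_braces(line: str, in_backtick: bool = False) -> int:
--     """Count net brace depth changes, skipping inside strings.
--
--     Handles Go's three string types: "double", 'rune', `backtick`.
--     """
--     depth = 0
--     in_double = False
--     in_bt = in_backtick
--     in_rune = False
--     escape = False
--
--     for ch in line:
--         if escape:
--             escape = False
--             continue
--         if ch == "\\" and not in_bt:
--             escape = True
--             continue
--
--         if in_rune:
--             if ch == "'":
--                 in_rune = False
--             continue
--         if in_double: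
--             if ch == '"':
--                 in_double = False
--             continue
--         if in_bt:
--             if ch == '`':
--                 in_bt = False
--             continue
--
--         if ch == "'":
--             in_rune = True
--         elif ch == '"':
--             in_double = True
--         elif ch == '`':
--             in_bt = True
--         elif ch == "{":
--             depth += 1
--         elif ch == "}":
--             depth -= 1
--
--     return depth
-- ===== SOURCE B (Python) =====
-- def _count_braces(line: str, in_backtick: bool = False) -> int:
--     """Count net brace depth changes, skipping inside strings (index-scan rewrite)."""
--     n = len(line)
--     i = 0
--     depth = 0
--     if in_backtick:
--         while i < n and line[i] != '`':
--             i += 1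
--         i += 1  # step past the closing backtick (or past the end)
--     while i < n:
--         ch = line[i]
--         if ch == '\\':
--             i += 2  # a backslash escapes the next character (outside raw strings)
--         elif ch == '{':
--             depth += 1
--             i += 1
--         elif ch == '}':
--             depth -= 1
--             i += 1
--         elif ch == '"' or ch == "'":
--             i += 1
--             while i < n:
--                 if line[i] == '\\':
--                     i += 2
--                 elif line[i] == ch:
--                     i += 1
--                     break
--                 else:
--                     i += 1
--         elif ch == '`':
--             i += 1
--             while i < n and line[i] != '`':
--                 i += 1
--             i += 1
--         else:
--             i += 1
--     return depth
-- ===== Notes on version B (the rewrite author's own statement) =====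
-- stated objective: alternative
-- what changed: Replaced A's single for-loop over five boolean state flags by an explicit index scan whose inner while-loops consume a whole string literal (quoted, rune or raw backtick) at a time, with escapes handled by advancing two positions.
import Mathlib
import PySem

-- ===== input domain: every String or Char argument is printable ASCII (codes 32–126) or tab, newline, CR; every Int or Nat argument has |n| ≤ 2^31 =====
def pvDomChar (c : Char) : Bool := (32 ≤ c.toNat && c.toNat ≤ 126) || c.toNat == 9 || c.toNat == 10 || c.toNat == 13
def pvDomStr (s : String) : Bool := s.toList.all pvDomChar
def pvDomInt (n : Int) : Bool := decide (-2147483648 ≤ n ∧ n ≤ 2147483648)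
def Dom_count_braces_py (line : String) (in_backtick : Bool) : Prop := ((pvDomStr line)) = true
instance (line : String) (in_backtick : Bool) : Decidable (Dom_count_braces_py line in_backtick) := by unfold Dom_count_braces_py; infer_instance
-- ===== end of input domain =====

-- B replaces A's per-character flag machine by an index/segment scan (inner scans skip whole
-- string literals); objective: alternative decomposition, same O(n) cost, return value only.

-- ===== PORT A =====
-- loop state of A: depth, in_double, in_bt, in_rune, escape
structure AState where
  depth : Int
  in_double : Bool
  in_bt : Bool
  in_rune : Bool
  escape : Bool
deriving DecidableEq, Repr

-- one iteration of A's for-loop, branches in source order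
def stepA (s : AState) (ch : Char) : AState :=
  if s.escape then { s with escape := false }
  else if ch = '\\' ∧ s.in_bt = false then { s with escape := true }
  else if s.in_rune then (if ch = '\'' then { s with in_rune := false } else s)
  else if s.in_double then (if ch = '"' then { s with in_double := false } else s)
  else if s.in_bt then (if ch = '`' then { s with in_bt := false } else s)
  else if ch = '\'' then { s with in_rune := true }
  else if ch = '"' then { s with in_double := true }
  else if ch = '`' then { s with in_bt := true }
  else if ch = '{' then { s with depth := s.depth + 1 }
  else if ch = '}' then { s with depth := s.depth - 1 }
  else s

def count_braces_py (line : String) (in_backtick : Bool) : Int :=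
  (line.toList.foldl stepA ⟨0, false, in_backtick, false, false⟩).depth

-- ===== PORT B =====
-- inner scan: advance past a raw backtick string (no escapes)
def skipBt : List Char → List Char
  | [] => []
  | c :: rest => if c = '`' then rest else skipBt rest

-- inner scan: advance past a quoted string with closer q, skipping one extra char after '\'
theorem tail_length_le {α : Type} (l : List α) : l.tail.length ≤ l.length := by
  cases l <;> simp

def skipStr (q : Char) : List Char → List Char
  | [] => []
  | c :: rest =>
    if c = '\\' then skipStr q rest.tail
    else if c = q then rest
    else skipStr q rest
termination_by l => l.length
decreasing_by
  · simp only [List.length_cons]; exact Nat.lt_succ_of_le (tail_length_le rest)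
  · simp

theorem skipBt_length_le (l : List Char) : (skipBt l).length ≤ l.length := by
  induction l with
  | nil => simp [skipBt]
  | cons c rest ih =>
      simp only [skipBt]
      split
      · simp
      · simpa using Nat.le_succ_of_le ih

theorem skipStr_length_le_aux (q : Char) : ∀ (n : Nat) (l : List Char), l.length ≤ n → (skipStr q l).length ≤ l.length := by
  intro n
  induction n with
  | zero =>
      intro l hl
      have : l = [] := List.eq_nil_of_length_eq_zero (Nat.le_zero.mp hl)
      subst this; simp [skipStr]
  | succ n ih =>
      intro l hl
      cases l with
      | nil => simp [skipStr]
      | cons c rest =>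
          have ht : rest.length ≤ n := by simpa using hl
          simp only [skipStr]
          split
          · exact le_trans (ih _ (le_trans (tail_length_le rest) ht))
              (le_trans (tail_length_le rest) (by simp))
          · split
            · simp
            · simpa using Nat.le_succ_of_le (ih rest ht)

theorem skipStr_length_le (q : Char) (l : List Char) : (skipStr q l).length ≤ l.length :=
  skipStr_length_le_aux q l.length l le_rfl

-- B's outer while-loop (the remaining suffix of the line plus the running depth)
def mainB : List Char → Int → Int
  | [], d => d
  | c :: rest, d =>
    if c = '\\' then mainB rest.tail d
    else if c = '{' then mainB rest (d + 1)
    else if c = '}' then mainB rest (d - 1)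
    else if c = '"' ∨ c = '\'' then mainB (skipStr c rest) d
    else if c = '`' then mainB (skipBt rest) d
    else mainB rest d
termination_by l _ => l.length
decreasing_by
  · simp only [List.length_cons]; exact Nat.lt_succ_of_le (tail_length_le rest)
  · simp
  · simp
  · simp only [List.length_cons]; exact Nat.lt_succ_of_le (skipStr_length_le c rest)
  · simp only [List.length_cons]; exact Nat.lt_succ_of_le (skipBt_length_le rest)
  · simp

def count_braces_py_alt (line : String) (in_backtick : Bool) : Int :=
  mainB (if in_backtick then skipBt line.toList else line.toList) 0

-- ===== PRECONDITION & SPEC =====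
def Spec_count_braces_py (line : String) (in_backtick : Bool) (out : Int) : Prop := out = count_braces_py_alt line in_backtick
instance (line : String) (in_backtick : Bool) (out : Int) : Decidable (Spec_count_braces_py line in_backtick out) := by unfold Spec_count_braces_py; infer_instance

-- ===== CLAIM (what is proved, stated in full; the proofs are below) =====
def Claim_equal_count_braces_py : Prop := ∀ (line : String) (in_backtick : Bool), Dom_count_braces_py line in_backtick → Spec_count_braces_py line in_backtick (count_braces_py line in_backtick)

-- ===== LEMMAS AND PROOFS =====

-- the four reachable flag configurations of A (escape handled by unfolding one step)
theorem key : ∀ (n : Nat) (l : List Char), l.length ≤ n →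
    (∀ d : Int, (l.foldl stepA ⟨d, false, false, false, false⟩).depth = mainB l d) ∧
    (∀ d : Int, (l.foldl stepA ⟨d, true, false, false, false⟩).depth = mainB (skipStr '"' l) d) ∧
    (∀ d : Int, (l.foldl stepA ⟨d, false, false, true, false⟩).depth = mainB (skipStr '\'' l) d) ∧
    (∀ d : Int, (l.foldl stepA ⟨d, false, true, false, false⟩).depth = mainB (skipBt l) d) := by
  intro n
  induction n with
  | zero =>
      intro l hl
      have : l = [] := List.eq_nil_of_length_eq_zero (Nat.le_zero.mp hl)
      subst this
      simp [mainB, skipStr, skipBt]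
  | succ n ih =>
      intro l hl
      match l with
      | [] => simp [mainB, skipStr, skipBt]
      | c :: t =>
        have ht : t.length ≤ n := by simpa using hl
        have htt : t.tail.length ≤ n := le_trans (tail_length_le t) ht
        refine ⟨?_, ?_, ?_, ?_⟩ <;> intro d
        · -- normal state
          by_cases hbs : c = '\\'
          · subst hbs
            simp only [List.foldl, stepA, mainB]
            norm_num
            match t with
            | [] => simp [mainB]
            | c' :: t' =>
                have ht' : t'.length ≤ n := le_trans (by simp) ht
                simp only [List.foldl, stepA]
                norm_num
                exact (ih t' ht').1 d
          · by_cases hq : c = '\''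
            · subst hq
              simp only [List.foldl, stepA, mainB]
              norm_num
              exact (ih t ht).2.2.1 d
            · by_cases hd : c = '"'
              · subst hd
                simp only [List.foldl, stepA, mainB]
                norm_num
                exact (ih t ht).2.1 d
              · by_cases hb : c = '`'
                · subst hb
                  simp only [List.foldl, stepA, mainB]
                  norm_num
                  exact (ih t ht).2.2.2 d
                · by_cases ho : c = '{'
                  · subst ho
                    simp only [List.foldl, stepA, mainB]
                    norm_num
                    exact (ih t ht).1 (d + 1)
                  · by_cases hc : c = '}'
                    · subst hc
                      simp only [List.foldl, stepA, mainB]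
                      norm_num
                      exact (ih t ht).1 (d - 1)
                    · simp only [List.foldl, stepA, mainB, hbs, hq, hd, hb, ho, hc]
                      norm_num [hbs, hq, hd, hb, ho, hc]
                      exact (ih t ht).1 d
        · -- in_double state
          by_cases hbs : c = '\\'
          · subst hbs
            simp only [List.foldl, stepA, skipStr]
            norm_num
            match t with
            | [] => simp [skipStr, mainB]
            | c' :: t' =>
                have ht' : t'.length ≤ n := le_trans (by simp) ht
                simp only [List.foldl, stepA, List.tail]
                norm_num
                exact (ih t' ht').2.1 d
          · by_cases hd : c = '"'
            · subst hd
              simp only [List.foldl, stepA, skipStr]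
              norm_num
              exact (ih t ht).1 d
            · simp only [List.foldl, stepA, skipStr, hbs, hd]
              norm_num [hbs, hd]
              exact (ih t ht).2.1 d
        · -- in_rune state
          by_cases hbs : c = '\\'
          · subst hbs
            simp only [List.foldl, stepA, skipStr]
            norm_num
            match t with
            | [] => simp [skipStr, mainB]
            | c' :: t' =>
                have ht' : t'.length ≤ n := le_trans (by simp) ht
                simp only [List.foldl, stepA, List.tail]
                norm_num
                exact (ih t' ht').2.2.1 d
          · by_cases hq : c = '\''
            · subst hq
              simp only [List.foldl, stepA, skipStr]
              norm_num
              exact (ih t ht).1 d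
            · simp only [List.foldl, stepA, skipStr, hbs, hq]
              norm_num [hbs, hq]
              exact (ih t ht).2.2.1 d
        · -- in_bt state
          by_cases hb : c = '`'
          · subst hb
            simp only [List.foldl, stepA, skipBt]
            norm_num
            exact (ih t ht).1 d
          · simp only [List.foldl, stepA, skipBt, hb]
            norm_num [hb]
            exact (ih t ht).2.2.2 d

-- ===== VERDICT (by name: the statement is the Claim_ definition above) =====
theorem count_braces_py_spec : Claim_equal_count_braces_py := by
  intro line in_backtick _
  unfold Spec_count_braces_py count_braces_py count_braces_py_alt
  have h := key line.toList.length line.toList le_rfl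
  cases in_backtick with
  | false => simpa using h.1 0
  | true => simpa using h.2.2.2 0
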